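-- pv_equiv track=rewrite | github.com/VKostoulas/Dose_Generation_3D | dosegen/configuration.py | compute_downsample_parameters
-- ===== SOURCE A (Python) =====
-- def compute_downsample_parameters(input_size, num_layers):
--     """
--     Generalized to handle 1D, 2D, or 3D input sizes.
--
--     Args:
--         input_size: list of ints [D, H, W] or [H, W] or [W]
--         num_layers: int, number of layers including the first one
--
--     Returns:
--         List of lists: [[[stride], [kernel], [padding]], ...] for each layer
--     """
--     ndim = len(input_size)
--     current_size = list(input_size)
--     parameters = []
--
--     for i in range(num_layers):
--         stride = [1] * ndim
--         kernel = [3] * ndim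
--         padding = [1] * ndim
--
--         if i == 0:
--             # First layer: adjust based on dimension disparity
--             for d in range(ndim):
--                 other_dims = [current_size[j] for j in range(ndim) if j != d]
--                 if current_size[d] <= 0.5 * max(other_dims, default=current_size[d]):
--                     kernel[d] = 1
--                     padding[d] = 0
--         else:
--             # Downsampling layers
--             for d in range(ndim):
--                 other_dims = [current_size[j] for j in range(ndim) if j != d]
--                 if current_size[d] <= 0.5 * max(other_dims, default=current_size[d]):
--                     stride[d] = 1
--                     kernel[d] = 1
--                     padding[d] = 0
--                 else:
--                     stride[d] = 2
--                     kernel[d] = 3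
--                     padding[d] = 1
--
--             # Update size after downsampling
--             for d in range(ndim):
--                 current_size[d] = (current_size[d] + 2 * padding[d] - kernel[d]) // stride[d] + 1
--
--         parameters.append([stride, kernel, padding])
--
--     return parameters
-- ===== SOURCE B (Python) =====
-- def compute_downsample_parameters(input_size, num_layers):
--     """Same result as A, but each layer precomputes max / uniqueness / second-max
--     once instead of rescanning the other dimensions for every dimension."""
--     ndim = len(input_size)
--     cs = list(input_size)
--     params = []
--     for i in range(num_layers):
--         unique = False
--         second = 0
--         M = 0
--         if ndim > 1:
--             M = max(cs)
--             unique = cs.count(M) == 1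
--             if unique:
--                 rest = list(cs)
--                 rest.remove(M)
--                 second = max(rest)
--         stride, kernel, padding = [], [], []
--         for c in cs:
--             other = c if ndim == 1 else (second if unique and c == M else M)
--             small = 2 * c <= other
--             stride.append(1 if small or i == 0 else 2)
--             kernel.append(1 if small else 3)
--             padding.append(0 if small else 1)
--         params.append([stride, kernel, padding])
--         if i > 0:
--             for d in range(ndim):
--                 cs[d] = (cs[d] + 2 * padding[d] - kernel[d]) // stride[d] + 1
--     return params
-- ===== Notes on version B (the rewrite author's own statement) =====
-- stated objective: faster
-- what changed: Each layer now computes one summary of the current size (its maximum, whether that maximum is unique, and the runner-up max) and derives every dimension's 'max of the other dims' from it, instead of A's per-dimension rebuild and rescan of the other-dims list; stride/kernel/padding and the size update are then emitted in a single pass over the dimensions.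
import Mathlib
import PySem

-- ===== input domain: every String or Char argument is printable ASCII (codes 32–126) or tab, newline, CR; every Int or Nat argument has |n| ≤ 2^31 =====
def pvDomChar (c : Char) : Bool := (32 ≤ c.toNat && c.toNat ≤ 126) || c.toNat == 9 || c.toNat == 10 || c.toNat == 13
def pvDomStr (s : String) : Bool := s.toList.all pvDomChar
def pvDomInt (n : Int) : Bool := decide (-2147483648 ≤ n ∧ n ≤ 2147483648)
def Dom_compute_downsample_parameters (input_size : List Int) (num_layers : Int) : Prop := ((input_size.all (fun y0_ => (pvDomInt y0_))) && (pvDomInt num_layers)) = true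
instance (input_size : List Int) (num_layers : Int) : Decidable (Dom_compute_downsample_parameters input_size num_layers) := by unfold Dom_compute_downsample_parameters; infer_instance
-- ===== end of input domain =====

-- B replaces A's per-dimension rescan of the other dimensions' maximum by one
-- per-layer summary (max, whether it is unique, second-largest); same return value.
-- Objective: faster — O(ndim) instead of O(ndim^2) work per layer (measured faster in a timing run).

-- ===== PORT A =====
-- Python's `current_size[d] <= 0.5 * m` compares an int with the float m/2, which is
-- exact for the sizes reached here (|m| < 2^53), so it is ported as 2*c ≤ m.
-- loop body of A's `for i in range(num_layers)` (named helper; code unchanged)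
def stepA (ndim : Nat) (st : List Int × List (List (List Int))) (i : Int) :
    List Int × List (List (List Int)) :=
  let cs := st.1
  if i = 0 then
    -- first layer: stride stays [1]*ndim; kernel/padding adjusted per dimension
    let kp := (List.range ndim).map (fun d =>
      let c := cs.getD d 0
      let others := ((List.range ndim).filter (fun j => j ≠ d)).map (fun j => cs.getD j 0)
      let m := PySem.List.maxD others (fun x => x) c   -- max(other_dims, default=c)
      if 2 * c ≤ m then ((1 : Int), (0 : Int)) else (3, 1))
    let stride := List.replicate ndim (1 : Int)
    let kernel := kp.map (·.1)
    let padding := kp.map (·.2)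
    (cs, st.2 ++ [[stride, kernel, padding]])
  else
    let skp := (List.range ndim).map (fun d =>
      let c := cs.getD d 0
      let others := ((List.range ndim).filter (fun j => j ≠ d)).map (fun j => cs.getD j 0)
      let m := PySem.List.maxD others (fun x => x) c
      if 2 * c ≤ m then ((1 : Int), (1 : Int), (0 : Int)) else (2, 3, 1))
    let stride := skp.map (·.1)
    let kernel := skp.map (·.2.1)
    let padding := skp.map (·.2.2)
    let cs' := (List.range ndim).map (fun d =>
      PySem.Int.floordiv (cs.getD d 0 + 2 * padding.getD d 0 - kernel.getD d 0) (stride.getD d 0) + 1)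
    (cs', st.2 ++ [[stride, kernel, padding]])

def compute_downsample_parameters (input_size : List Int) (num_layers : Int) : List (List (List Int)) :=
  ((PySem.List.pyRange 0 num_layers 1).foldl (stepA input_size.length)
    (input_size, ([] : List (List (List Int))))).2

-- ===== PORT B =====
-- helpers for B's per-layer summary: max(cs), and max(rest) after rest.remove(max(cs))
def bigM (cs : List Int) : Int := (PySem.List.max? cs (fun x => x)).getD 0
def secondOf (cs : List Int) : Int :=
  (PySem.List.max? ((PySem.List.remove? cs (bigM cs)).getD []) (fun x => x)).getD 0

-- loop body of B's `for i in range(num_layers)` (named helper; code unchanged)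
def stepB (ndim : Nat) (st : List Int × List (List (List Int))) (i : Int) :
    List Int × List (List (List Int)) :=
  let cs := st.1
  -- per-layer summary, computed once (only meaningful when ndim > 1)
  let M := if ndim > 1 then bigM cs else 0
  let unique := decide (ndim > 1 ∧ cs.count M = 1)
  let second := if unique then secondOf cs else 0
  let smalls := cs.map (fun c =>
    let other := if ndim ≤ 1 then c else (if unique ∧ c = M then second else M)
    decide (2 * c ≤ other))
  let stride := smalls.map (fun s => if s || i == 0 then (1 : Int) else 2)
  let kernel := smalls.map (fun s => if s then (1 : Int) else 3)
  let padding := smalls.map (fun s => if s then (0 : Int) else 1)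
  let cs' := if i > 0 then
      (List.range ndim).map (fun d =>
        PySem.Int.floordiv (cs.getD d 0 + 2 * padding.getD d 0 - kernel.getD d 0) (stride.getD d 0) + 1)
    else cs
  (cs', st.2 ++ [[stride, kernel, padding]])

def compute_downsample_parameters_alt (input_size : List Int) (num_layers : Int) : List (List (List Int)) :=
  ((PySem.List.pyRange 0 num_layers 1).foldl (stepB input_size.length)
    (input_size, ([] : List (List (List Int))))).2

-- ===== PRECONDITION & SPEC =====
def Spec_compute_downsample_parameters (input_size : List Int) (num_layers : Int) (out : List (List (List Int))) : Prop := out = compute_downsample_parameters_alt input_size num_layers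
instance (input_size : List Int) (num_layers : Int) (out : List (List (List Int))) : Decidable (Spec_compute_downsample_parameters input_size num_layers out) := by unfold Spec_compute_downsample_parameters; infer_instance

-- ===== CLAIM (what is proved, stated in full; the proofs are below) =====
def Claim_equal_compute_downsample_parameters : Prop := ∀ (input_size : List Int) (num_layers : Int), Dom_compute_downsample_parameters input_size num_layers → Spec_compute_downsample_parameters input_size num_layers (compute_downsample_parameters input_size num_layers)

-- ===== LEMMAS AND PROOFS =====

-- max? with the identity key returns THE maximum value
theorem max?_id_eq {xs : List Int} {v : Int} (hv : v ∈ xs) (hb : ∀ y ∈ xs, y ≤ v) :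
    PySem.List.max? xs (fun x => x) = some v := by
  cases hm : PySem.List.max? xs (fun x => x) with
  | none =>
      have : xs = [] := by
        have := (PySem.List.max?_eq_none_iff (xs := xs) (key := fun x => x)).mp hm
        exact this
      simp [this] at hv
  | some m =>
      have hmem : m ∈ xs := PySem.List.max?_mem hm
      have h1 : v ≤ m := PySem.List.max?_isMax hm v hv
      have h2 : m ≤ v := hb m hmem
      exact congrArg some (le_antisymm h2 h1)

-- the mapped range with getD is the list itself (mapped by f)
theorem map_range_getD {α β : Type} (cs : List α) (f : α → β) (d0 : α) :
    (List.range cs.length).map (fun d => f (cs.getD d d0)) = cs.map f := by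
  induction cs with
  | nil => simp
  | cons x t ih =>
      rw [List.length_cons, List.range_succ_eq_map]
      simp only [List.map_cons, List.map_map]
      refine congrArg₂ _ rfl ?_
      simpa [Function.comp] using ih

-- A's other_dims comprehension IS cs.eraseIdx d
theorem others_eq_eraseIdx {α : Type} (cs : List α) (d : Nat) (d0 : α) :
    ((List.range cs.length).filter (fun j => j ≠ d)).map (fun j => cs.getD j d0) = cs.eraseIdx d := by
  induction cs generalizing d with
  | nil => simp
  | cons x t ih =>
      rw [List.length_cons, List.range_succ_eq_map]
      cases d with
      | zero =>
          rw [List.filter_cons, if_neg (by simp), List.filter_map]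
          rw [show List.filter ((fun j => decide (j ≠ 0)) ∘ Nat.succ) (List.range t.length) = List.range t.length
              from List.filter_eq_self.mpr (by intro a _; simp [Function.comp])]
          rw [List.map_map]
          simp only [Function.comp_def, List.getD_cons_succ, List.eraseIdx_cons_zero]
          simpa using map_range_getD t id d0
      | succ e =>
          rw [List.filter_cons, if_pos (by simp), List.filter_map, List.map_cons, List.map_map]
          rw [show List.filter ((fun j => decide (j ≠ e + 1)) ∘ Nat.succ) (List.range t.length) =
              List.filter (fun j => j ≠ e) (List.range t.length)
              from List.filter_congr (by intro a _; simp [Function.comp])]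
          simp only [Function.comp_def, List.getD_cons_succ, List.getD_cons_zero, List.eraseIdx_cons_succ]
          exact congrArg₂ _ rfl (ih e)

-- the value B uses as "max of the other dims" for an element c of cs
def otherB (cs : List Int) (c : Int) : Int :=
  if cs.length ≤ 1 then c
  else if cs.count (bigM cs) = 1 ∧ c = bigM cs then secondOf cs else bigM cs

-- MAIN LEMMA: the max of the other dims (A) equals B's summary-based value
theorem maxD_eraseIdx_eq_otherB (cs : List Int) (d : Nat) (hd : d < cs.length) :
    PySem.List.maxD (cs.eraseIdx d) (fun x => x) (cs.getD d 0) = otherB cs (cs.getD d 0) := by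
  have hgd : cs.getD d 0 = cs[d] := List.getD_eq_getElem cs 0 hd
  by_cases h1 : cs.length ≤ 1
  · -- a single dimension: other_dims is empty, both sides are cs[d] itself
    have hd0 : d = 0 := by omega
    have hone : cs.length = 1 := by omega
    obtain ⟨x, hx⟩ : ∃ x, cs = [x] := List.length_eq_one_iff.mp hone
    subst hx hd0
    simp [PySem.List.maxD, PySem.List.max?, otherB]
  · -- at least two dimensions
    have h2 : 2 ≤ cs.length := by omega
    have hne : cs ≠ [] := by intro h; simp [h] at hd
    obtain ⟨M0, hM0⟩ : ∃ m, PySem.List.max? cs (fun x => x) = some m := by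
      cases hm : PySem.List.max? cs (fun x => x) with
      | none => exact absurd ((PySem.List.max?_eq_none_iff _ _).mp hm) hne
      | some m => exact ⟨m, rfl⟩
    have hMdef : bigM cs = M0 := by simp [bigM, hM0]
    have hMmem : M0 ∈ cs := PySem.List.max?_mem hM0
    have hMmax : ∀ y ∈ cs, y ≤ M0 := fun y hy => PySem.List.max?_isMax hM0 y hy
    have htd : cs = cs.take d ++ cs[d] :: cs.drop (d + 1) := by
      conv_lhs => rw [← List.take_append_drop d cs]
      rw [List.drop_eq_getElem_cons hd]
    have he : cs.eraseIdx d = cs.take d ++ cs.drop (d + 1) := List.eraseIdx_eq_take_drop_succ cs d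
    by_cases hu : cs.count (bigM cs) = 1 ∧ cs.getD d 0 = bigM cs
    · -- cs[d] is the unique maximum: removing index d IS removing the first maximum
      obtain ⟨hcnt, hcM⟩ := hu
      rw [hMdef] at hcnt
      have hcM' : cs[d] = M0 := by rw [← hgd, hcM, hMdef]
      have hsplit : cs.count M0 = (cs.take d).count M0 + ((cs[d] :: cs.drop (d + 1)).count M0) := by
        conv_lhs => rw [htd]
        exact List.count_append
      have hcons : (cs[d] :: cs.drop (d + 1)).count M0 = (cs.drop (d + 1)).count M0 + 1 := by
        rw [hcM']; simp
      have htake0 : (cs.take d).count M0 = 0 := by omega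
      have hMtake : M0 ∉ cs.take d := List.count_eq_zero.mp htake0
      have herase : cs.erase M0 = cs.eraseIdx d := by
        conv_lhs => rw [htd]
        rw [List.erase_append_right _ hMtake, hcM', List.erase_cons_head, he]
      have hrem : (PySem.List.remove? cs (bigM cs)).getD [] = cs.eraseIdx d := by
        rw [hMdef, PySem.List.remove?_eq_some_erase cs M0 hMmem]
        simp [herase]
      have hnil : cs.eraseIdx d ≠ [] := by
        have := List.length_eraseIdx_of_lt hd
        intro h; rw [h] at this; simp at this; omega
      obtain ⟨s, hs⟩ : ∃ s, PySem.List.max? (cs.eraseIdx d) (fun x => x) = some s := by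
        cases hm : PySem.List.max? (cs.eraseIdx d) (fun x => x) with
        | none => exact absurd ((PySem.List.max?_eq_none_iff _ _).mp hm) hnil
        | some s => exact ⟨s, rfl⟩
      rw [otherB, if_neg (by omega), if_pos ⟨by rw [hMdef]; exact hcnt, hcM⟩]
      rw [PySem.List.maxD, hs, secondOf, hrem, hs]
      rfl
    · -- the maximum also occurs among the other dims: their max is still M0
      have hmem' : M0 ∈ cs.eraseIdx d := by
        rw [hgd, hMdef] at hu
        by_cases hM : cs[d] = M0
        · have hcnt2 : 2 ≤ cs.count M0 := by
            have h1c : 1 ≤ cs.count M0 := List.one_le_count_iff.mpr hMmem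
            rcases Nat.lt_or_ge (cs.count M0) 2 with hlt | hge
            · exact absurd ⟨by omega, hM⟩ hu
            · exact hge
          have hsplit : cs.count M0 = (cs.take d).count M0 + ((cs[d] :: cs.drop (d + 1)).count M0) := by
            conv_lhs => rw [htd]
            exact List.count_append
          have hcons : (cs[d] :: cs.drop (d + 1)).count M0 = (cs.drop (d + 1)).count M0 + 1 := by
            rw [hM]; simp
          have : 1 ≤ (cs.take d).count M0 + (cs.drop (d + 1)).count M0 := by omega
          rw [he, List.mem_append]
          rcases Nat.lt_or_ge 0 ((cs.take d).count M0) with hp | hp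
          · exact Or.inl (List.one_le_count_iff.mp (by omega))
          · exact Or.inr (List.one_le_count_iff.mp (by omega))
        · have : M0 ∈ cs.take d ++ cs[d] :: cs.drop (d + 1) := by rw [← htd]; exact hMmem
          rw [List.mem_append, List.mem_cons] at this
          rw [he, List.mem_append]
          rcases this with h | h
          · exact Or.inl h
          · rcases h with h | h
            · exact absurd h.symm hM
            · exact Or.inr h
      have hbound : ∀ y ∈ cs.eraseIdx d, y ≤ M0 :=
        fun y hy => hMmax y ((List.eraseIdx_sublist cs d).mem hy)
      have hmax : PySem.List.max? (cs.eraseIdx d) (fun x => x) = some M0 := max?_id_eq hmem' hbound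
      rw [otherB, if_neg (by omega), if_neg (by rw [hMdef] at hu ⊢; exact hu)]
      rw [PySem.List.maxD, hmax, hMdef]
      rfl

-- A's per-dimension map over indices, rewritten as a map over the elements
theorem mapA_eq {β : Type} (cs : List Int) (X Y : β) :
    (List.range cs.length).map (fun d =>
      let c := cs.getD d 0
      let others := ((List.range cs.length).filter (fun j => j ≠ d)).map (fun j => cs.getD j 0)
      let m := PySem.List.maxD others (fun x => x) c
      if 2 * c ≤ m then X else Y)
    = cs.map (fun c => if 2 * c ≤ otherB cs c then X else Y) := by
  rw [← map_range_getD cs (fun c => if 2 * c ≤ otherB cs c then X else Y) 0]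
  apply List.map_congr_left
  intro d hdm
  have hd : d < cs.length := List.mem_range.mp hdm
  simp only
  rw [others_eq_eraseIdx, maxD_eraseIdx_eq_otherB cs d hd]

-- B's per-element "other" value is otherB
theorem otherB_step (cs : List Int) (c : Int) :
    (if cs.length ≤ 1 then c
     else (if (decide (cs.length > 1 ∧ cs.count (if cs.length > 1 then bigM cs else 0) = 1) : Bool)
              ∧ c = (if cs.length > 1 then bigM cs else 0)
           then (if (decide (cs.length > 1 ∧ cs.count (if cs.length > 1 then bigM cs else 0) = 1) : Bool)
                 then secondOf cs else 0)
           else (if cs.length > 1 then bigM cs else 0)))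
    = otherB cs c := by
  by_cases h1 : cs.length ≤ 1
  · simp [otherB, h1]
  · have hg : cs.length > 1 := by omega
    rw [otherB, if_neg h1, if_neg h1]
    by_cases hcnt : cs.count (bigM cs) = 1 <;> simp [hcnt, hg]

-- the two loop bodies agree on every state whose size list has length ndim, and preserve that length
theorem step_eq (ndim : Nat) (st : List Int × List (List (List Int))) (i : Int)
    (hi : 0 ≤ i) (hst : st.1.length = ndim) :
    stepA ndim st i = stepB ndim st i ∧ (stepA ndim st i).1.length = ndim := by
  obtain ⟨cs, acc⟩ := st
  simp only at hst
  subst hst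
  have hsm : ∀ (f : Bool → Int),
      List.map f (List.map (fun c => decide (2 * c ≤
          if cs.length ≤ 1 then c
          else if decide (cs.length > 1 ∧ List.count (if cs.length > 1 then bigM cs else 0) cs = 1) = true
                  ∧ c = (if cs.length > 1 then bigM cs else 0)
            then (if decide (cs.length > 1 ∧ List.count (if cs.length > 1 then bigM cs else 0) cs = 1) = true
                  then secondOf cs else 0)
            else (if cs.length > 1 then bigM cs else 0))) cs)
      = List.map (fun c => f (decide (2 * c ≤ otherB cs c))) cs := by
    intro f
    rw [List.map_map]
    apply List.map_congr_left
    intro c _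
    simp only [Function.comp]
    rw [otherB_step cs c]
  by_cases h0 : i = 0
  · subst h0
    refine ⟨?_, by rw [stepA]; simp⟩
    show stepA cs.length (cs, acc) 0 = stepB cs.length (cs, acc) 0
    simp only [stepA, stepB, if_neg (show ¬((0 : Int) > 0) by omega), if_true]
    rw [mapA_eq cs ((1 : Int), (0 : Int)) ((3 : Int), (1 : Int))]
    have hstr : List.map (fun s => if (s || ((0:Int) == (0:Int))) then (1:Int) else 2)
        (List.map (fun c => decide (2 * c ≤
          if cs.length ≤ 1 then c
          else if decide (cs.length > 1 ∧ List.count (if cs.length > 1 then bigM cs else 0) cs = 1) = true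
                  ∧ c = (if cs.length > 1 then bigM cs else 0)
            then (if decide (cs.length > 1 ∧ List.count (if cs.length > 1 then bigM cs else 0) cs = 1) = true
                  then secondOf cs else 0)
            else (if cs.length > 1 then bigM cs else 0))) cs)
        = List.replicate cs.length (1:Int) := by
      rw [hsm (fun s => if (s || ((0:Int) == (0:Int))) then (1:Int) else 2)]
      simp
    have hker : List.map (fun s => if s then (1:Int) else 3)
        (List.map (fun c => decide (2 * c ≤
          if cs.length ≤ 1 then c
          else if decide (cs.length > 1 ∧ List.count (if cs.length > 1 then bigM cs else 0) cs = 1) = true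
                  ∧ c = (if cs.length > 1 then bigM cs else 0)
            then (if decide (cs.length > 1 ∧ List.count (if cs.length > 1 then bigM cs else 0) cs = 1) = true
                  then secondOf cs else 0)
            else (if cs.length > 1 then bigM cs else 0))) cs)
        = List.map (fun x => x.1) (List.map (fun c => if 2 * c ≤ otherB cs c then ((1:Int), (0:Int)) else (3, 1)) cs) := by
      rw [hsm (fun s => if s then (1:Int) else 3), List.map_map]
      apply List.map_congr_left
      intro c _
      by_cases hc : 2 * c ≤ otherB cs c <;> simp [hc]
    have hpad : List.map (fun s => if s then (0:Int) else 1)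
        (List.map (fun c => decide (2 * c ≤
          if cs.length ≤ 1 then c
          else if decide (cs.length > 1 ∧ List.count (if cs.length > 1 then bigM cs else 0) cs = 1) = true
                  ∧ c = (if cs.length > 1 then bigM cs else 0)
            then (if decide (cs.length > 1 ∧ List.count (if cs.length > 1 then bigM cs else 0) cs = 1) = true
                  then secondOf cs else 0)
            else (if cs.length > 1 then bigM cs else 0))) cs)
        = List.map (fun x => x.2) (List.map (fun c => if 2 * c ≤ otherB cs c then ((1:Int), (0:Int)) else (3, 1)) cs) := by
      rw [hsm (fun s => if s then (0:Int) else 1), List.map_map]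
      apply List.map_congr_left
      intro c _
      by_cases hc : 2 * c ≤ otherB cs c <;> simp [hc]
    rw [hstr, hker, hpad]
  · have hipos : i > 0 := by omega
    refine ⟨?_, by rw [stepA]; simp [if_neg h0]⟩
    show stepA cs.length (cs, acc) i = stepB cs.length (cs, acc) i
    simp only [stepA, stepB, if_neg h0, if_pos hipos]
    rw [mapA_eq cs ((1 : Int), (1 : Int), (0 : Int)) ((2 : Int), (3 : Int), (1 : Int))]
    have hieq : (i == (0:Int)) = false := by simp [h0]
    have hstr : List.map (fun s => if (s || (i == (0:Int))) then (1:Int) else 2)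
        (List.map (fun c => decide (2 * c ≤
          if cs.length ≤ 1 then c
          else if decide (cs.length > 1 ∧ List.count (if cs.length > 1 then bigM cs else 0) cs = 1) = true
                  ∧ c = (if cs.length > 1 then bigM cs else 0)
            then (if decide (cs.length > 1 ∧ List.count (if cs.length > 1 then bigM cs else 0) cs = 1) = true
                  then secondOf cs else 0)
            else (if cs.length > 1 then bigM cs else 0))) cs)
        = List.map (fun x => x.1) (List.map (fun c => if 2 * c ≤ otherB cs c then ((1:Int), (1:Int), (0:Int)) else (2, 3, 1)) cs) := by
      rw [hsm (fun s => if (s || (i == (0:Int))) then (1:Int) else 2), List.map_map]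
      apply List.map_congr_left
      intro c _
      by_cases hc : 2 * c ≤ otherB cs c <;> simp [hc, hieq]
    have hker : List.map (fun s => if s then (1:Int) else 3)
        (List.map (fun c => decide (2 * c ≤
          if cs.length ≤ 1 then c
          else if decide (cs.length > 1 ∧ List.count (if cs.length > 1 then bigM cs else 0) cs = 1) = true
                  ∧ c = (if cs.length > 1 then bigM cs else 0)
            then (if decide (cs.length > 1 ∧ List.count (if cs.length > 1 then bigM cs else 0) cs = 1) = true
                  then secondOf cs else 0)
            else (if cs.length > 1 then bigM cs else 0))) cs)
        = List.map (fun x => x.2.1) (List.map (fun c => if 2 * c ≤ otherB cs c then ((1:Int), (1:Int), (0:Int)) else (2, 3, 1)) cs) := by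
      rw [hsm (fun s => if s then (1:Int) else 3), List.map_map]
      apply List.map_congr_left
      intro c _
      by_cases hc : 2 * c ≤ otherB cs c <;> simp [hc]
    have hpad : List.map (fun s => if s then (0:Int) else 1)
        (List.map (fun c => decide (2 * c ≤
          if cs.length ≤ 1 then c
          else if decide (cs.length > 1 ∧ List.count (if cs.length > 1 then bigM cs else 0) cs = 1) = true
                  ∧ c = (if cs.length > 1 then bigM cs else 0)
            then (if decide (cs.length > 1 ∧ List.count (if cs.length > 1 then bigM cs else 0) cs = 1) = true
                  then secondOf cs else 0)
            else (if cs.length > 1 then bigM cs else 0))) cs)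
        = List.map (fun x => x.2.2) (List.map (fun c => if 2 * c ≤ otherB cs c then ((1:Int), (1:Int), (0:Int)) else (2, 3, 1)) cs) := by
      rw [hsm (fun s => if s then (0:Int) else 1), List.map_map]
      apply List.map_congr_left
      intro c _
      by_cases hc : 2 * c ≤ otherB cs c <;> simp [hc]
    rw [← hstr, ← hker, ← hpad]

-- fold equality over any index list of nonnegatives
theorem fold_eq (ndim : Nat) (l : List Int) (hl : ∀ i ∈ l, 0 ≤ i) :
    ∀ (st : List Int × List (List (List Int))), st.1.length = ndim →
      l.foldl (stepA ndim) st = l.foldl (stepB ndim) st := by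
  induction l with
  | nil => intro st _; rfl
  | cons x t ih =>
      intro st hst
      obtain ⟨heq, hlen⟩ := step_eq ndim st x (hl x List.mem_cons_self) hst
      rw [List.foldl_cons, List.foldl_cons, ← heq]
      exact ih (fun i hi => hl i (List.mem_cons_of_mem x hi)) _ hlen

-- ===== VERDICT (by name: the statement is the Claim_ definition above) =====
theorem compute_downsample_parameters_spec : Claim_equal_compute_downsample_parameters := by
  intro input_size num_layers _
  show compute_downsample_parameters input_size num_layers = compute_downsample_parameters_alt input_size num_layers
  rw [compute_downsample_parameters, compute_downsample_parameters_alt]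
  rw [fold_eq input_size.length (PySem.List.pyRange 0 num_layers 1)
      (fun i hi => (PySem.List.mem_pyRange_one.mp hi).1) (input_size, []) rfl]
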